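-- pv_equiv track=rewrite | github.com/chengqipeng/ai-stock-agent | service/jqka10/stock_day_kline_data_10jqka.py | _build_dates
-- ===== SOURCE A (Python) =====
-- def _build_dates(start: str, sort_year: list, dates_str: str) -> list[str]:
--     """将 sortYear + dates 还原为完整日期列表 YYYY-MM-DD"""
--     mmdd_list = dates_str.split(",")
--     result = []
--     idx = 0
--     for year, count in sort_year:
--         for _ in range(count):
--             if idx >= len(mmdd_list):
--                 break
--             mmdd = mmdd_list[idx]
--             # 同花顺周K的 dates 可能是 "MM-DD" 格式（含连字符），日K是 "MMDD"
--             if "-" in mmdd: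
--                 result.append(f"{year}-{mmdd}")
--             else:
--                 result.append(f"{year}-{mmdd[:2]}-{mmdd[2:]}")
--             idx += 1
--     return result
-- ===== SOURCE B (Python) =====
-- def _build_dates(start: str, sort_year: list, dates_str: str) -> list[str]:
--     """Simpler: precompute the flat year list (capped at the number of dates), then one zip pass."""
--     mmdd_list = dates_str.split(",")
--     n = len(mmdd_list)
--     years = []
--     for year, count in sort_year:
--         years += [year] * min(count, n - len(years))
--     return [
--         f"{year}-{mmdd}" if "-" in mmdd else f"{year}-{mmdd[:2]}-{mmdd[2:]}"
--         for year, mmdd in zip(years, mmdd_list)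
--     ]
-- ===== Notes on version B (the rewrite author's own statement) =====
-- stated objective: simpler
-- what changed: Replaces the nested loops with a manual idx counter and an inner break by precomputing a flat expanded year list (each (year,count) expanded by list repetition, capped at the number of remaining dates) and a single zip pass whose truncation reproduces A's break semantics.
import Mathlib
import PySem

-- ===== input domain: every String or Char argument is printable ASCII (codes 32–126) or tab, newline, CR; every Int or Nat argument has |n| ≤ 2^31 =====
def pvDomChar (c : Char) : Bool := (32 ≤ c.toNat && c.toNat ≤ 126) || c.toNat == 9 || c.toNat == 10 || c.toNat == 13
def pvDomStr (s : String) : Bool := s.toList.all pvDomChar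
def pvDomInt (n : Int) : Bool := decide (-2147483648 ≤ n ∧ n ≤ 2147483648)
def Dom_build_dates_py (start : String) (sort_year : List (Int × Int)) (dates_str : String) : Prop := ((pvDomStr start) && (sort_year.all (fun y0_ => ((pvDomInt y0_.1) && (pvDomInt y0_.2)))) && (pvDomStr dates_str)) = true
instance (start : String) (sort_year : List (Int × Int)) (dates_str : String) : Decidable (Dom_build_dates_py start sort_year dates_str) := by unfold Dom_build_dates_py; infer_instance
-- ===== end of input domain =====

-- B precomputes the flat year list and makes one zip pass; A threads an idx counter through nested loops with a break.

-- shared formatting of one date: f"{year}-{mmdd}" or f"{year}-{mmdd[:2]}-{mmdd[2:]}" (identical inline expressions in both Pythons)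
def pvFmt (year : Int) (mmdd : String) : String :=
  if PySem.Str.isIn "-" mmdd then
    String.ofList (PySem.Int.toChars year ++ '-' :: mmdd.toList)
  else
    String.ofList (PySem.Int.toChars year ++ '-' ::
      (PySem.List.slice mmdd.toList none (some 2) ++ '-' :: PySem.List.slice mmdd.toList (some 2) none))

-- ===== PORT A =====
-- inner 'for _ in range(count)' loop with its break ('if idx >= len(mmdd_list): break')
def pvInnerA (year : Int) (mmdd_list : List String) : Nat → List String × Nat → List String × Nat
  | 0, st => st
  | n + 1, (result, idx) =>
      if idx ≥ mmdd_list.length then (result, idx)   -- break: remaining iterations skipped, state unchanged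
      else pvInnerA year mmdd_list n (result ++ [pvFmt year (mmdd_list.getD idx "")], idx + 1)

def build_dates_py (start : String) (sort_year : List (Int × Int)) (dates_str : String) : List String :=
  let mmdd_list := (PySem.Str.split? dates_str ",").getD []  -- sep is the nonempty literal ",", so split? is some
  (sort_year.foldl (fun st p => pvInnerA p.1 mmdd_list p.2.toNat st) ([], 0)).1

-- ===== PORT B =====
def build_dates_py_alt (start : String) (sort_year : List (Int × Int)) (dates_str : String) : List String :=
  let mmdd_list := (PySem.Str.split? dates_str ",").getD []  -- sep is the nonempty literal ",", so split? is some
  let n : Int := mmdd_list.length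
  let years := sort_year.foldl (fun acc p => acc ++ PySem.List.pyRepeat [p.1] (min p.2 (n - acc.length))) []
  (years.zip mmdd_list).map (fun q => pvFmt q.1 q.2)

-- ===== PRECONDITION & SPEC =====
def Spec_build_dates_py (start : String) (sort_year : List (Int × Int)) (dates_str : String) (out : List String) : Prop := out = build_dates_py_alt start sort_year dates_str
instance (start : String) (sort_year : List (Int × Int)) (dates_str : String) (out : List String) : Decidable (Spec_build_dates_py start sort_year dates_str out) := by unfold Spec_build_dates_py; infer_instance

-- ===== CLAIM (what is proved, stated in full; the proofs are below) =====
def Claim_equal_build_dates_py : Prop := ∀ (start : String) (sort_year : List (Int × Int)) (dates_str : String), Dom_build_dates_py start sort_year dates_str → Spec_build_dates_py start sort_year dates_str (build_dates_py start sort_year dates_str)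

-- ===== LEMMAS AND PROOFS =====

-- one step of A's inner loop, on the flattened year list
def pvStep (mmdd_list : List String) (st : List String × Nat) (year : Int) : List String × Nat :=
  if st.2 ≥ mmdd_list.length then st
  else (st.1 ++ [pvFmt year (mmdd_list.getD st.2 "")], st.2 + 1)

theorem pvInnerA_eq_foldl (year : Int) (mmdd_list : List String) (n : Nat) (st : List String × Nat) :
    pvInnerA year mmdd_list n st = (List.replicate n year).foldl (pvStep mmdd_list) st := by
  induction n generalizing st with
  | zero => rfl
  | succ n ih =>
    obtain ⟨res, idx⟩ := st
    rw [List.replicate_succ, List.foldl_cons]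
    simp only [pvInnerA, pvStep, ge_iff_le]
    split_ifs with h
    · clear ih
      induction n with
      | zero => rfl
      | succ n ihm =>
        rw [List.replicate_succ, List.foldl_cons]
        simp only [pvStep, ge_iff_le, h, if_pos]
        exact ihm
    · exact ih _

theorem pvFoldlStep_fst (mmdd_list : List String) (ys : List Int) (res : List String) (idx : Nat) :
    (ys.foldl (pvStep mmdd_list) (res, idx)).1
      = res ++ ((ys.zip (mmdd_list.drop idx)).map (fun q => pvFmt q.1 q.2)) := by
  induction ys generalizing res idx with
  | nil => simp
  | cons y ys ih =>
    by_cases h : idx ≥ mmdd_list.length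
    · have hd : mmdd_list.drop idx = [] := List.drop_eq_nil_of_le h
      simp only [List.foldl_cons, pvStep, ge_iff_le]
      rw [if_pos h, ih, hd]
      simp
    · push Not at h
      obtain ⟨m, hm⟩ : ∃ m, mmdd_list.drop idx = mmdd_list.getD idx "" :: mmdd_list.drop (idx + 1) := by
        refine ⟨0, ?_⟩
        rw [List.getD_eq_getElem?_getD, List.getElem?_eq_getElem h]
        exact (List.drop_eq_getElem_cons h).trans rfl
      simp only [List.foldl_cons, pvStep, ge_iff_le]
      rw [if_neg (by omega), ih, hm]
      simp [List.zip_cons_cons]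

theorem pvFoldl_flatten (mmdd_list : List String) (sort_year : List (Int × Int)) (st : List String × Nat) :
    sort_year.foldl (fun st p => pvInnerA p.1 mmdd_list p.2.toNat st) st
      = (sort_year.foldl (fun acc p => acc ++ PySem.List.pyRepeat [p.1] p.2) []).foldl (pvStep mmdd_list) st := by
  rw [PySem.List.foldl_append_eq_flatMap]
  induction sort_year generalizing st with
  | nil => rfl
  | cons p rest ih =>
    simp only [List.foldl_cons, List.flatMap_cons, List.foldl_append, List.nil_append]
    rw [pvInnerA_eq_foldl, PySem.List.pyRepeat_singleton, ih]
    simp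

theorem pvTake_cap (n m : Nat) (y : Int) (acc rest : List Int) (h : acc.length ≤ n) :
    (acc ++ (List.replicate (min m (n - acc.length)) y ++ rest)).take n
      = (acc ++ (List.replicate m y ++ rest)).take n := by
  rw [List.take_append, List.take_append (l₁ := acc)]
  congr 1
  rw [List.take_append, List.take_append (l₁ := List.replicate m y)]
  simp only [List.take_replicate, List.length_replicate]
  have h1 : min (n - acc.length) (min m (n - acc.length)) = min (n - acc.length) m := by omega
  have h2 : n - acc.length - min m (n - acc.length) = n - acc.length - m := by omega
  rw [h1, h2]

theorem pvCapped_eq_take (n : Nat) (l : List (Int × Int)) (acc : List Int) (h : acc.length ≤ n) :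
    l.foldl (fun acc p => acc ++ List.replicate ((min p.2 ((n : Int) - acc.length)).toNat) p.1) acc
      = (acc ++ l.flatMap (fun p => List.replicate p.2.toNat p.1)).take n := by
  induction l generalizing acc with
  | nil => simp [List.take_of_length_le h]
  | cons p l ih =>
    simp only [List.foldl_cons, List.flatMap_cons]
    have hk : (min p.2 ((n : Int) - (acc.length : Int))).toNat = min p.2.toNat (n - acc.length) := by omega
    rw [hk, ih _ (by simp only [List.length_append, List.length_replicate]; omega)]
    rw [List.append_assoc acc]
    exact pvTake_cap n p.2.toNat p.1 acc _ h

theorem pvZip_take (xs : List Int) (ys : List String) :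
    (xs.take ys.length).zip ys = xs.zip ys := by
  induction xs generalizing ys with
  | nil => simp
  | cons x xs ih =>
    cases ys with
    | nil => simp
    | cons y ys => simp [ih]

theorem build_dates_py_spec' (start : String) (sort_year : List (Int × Int)) (dates_str : String) :
    build_dates_py start sort_year dates_str = build_dates_py_alt start sort_year dates_str := by
  show (List.foldl (fun st p => pvInnerA p.1 ((PySem.Str.split? dates_str ",").getD []) p.2.toNat st) ([], 0) sort_year).1 = _
  rw [pvFoldl_flatten, pvFoldlStep_fst]
  unfold build_dates_py_alt
  simp only [PySem.List.foldl_append_eq_flatMap, PySem.List.pyRepeat_singleton, List.nil_append,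
    List.drop_zero]
  rw [pvCapped_eq_take _ _ _ (by simp), List.nil_append, pvZip_take]

-- ===== VERDICT (by name: the statement is the Claim_ definition above) =====
theorem build_dates_py_spec : Claim_equal_build_dates_py := by
  intro start sort_year dates_str _
  unfold Spec_build_dates_py
  exact build_dates_py_spec' start sort_year dates_str
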